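-- pv_equiv track=rewrite | github.com/MrBrantCode/unitest_baseline | mut_generate/mist_train_taco/taco_16402/solution.py | maximize_ball_value
-- ===== SOURCE A (Python) =====
-- def maximize_ball_value(N, M, C, limits, balls):
--     # Create a dictionary to store the limit for each color
--     L = {i + 1: limits[i] for i in range(C)}
--
--     # Sort balls by value in descending order
--     balls = sorted(balls, key=lambda x: x[1], reverse=True)
--
--     count = 0
--     ans = 0
--
--     for (c, w) in balls:
--         if count == M:
--             break
--         if L[c] == 0:
--             continue
--         else:
--             count += 1
--             ans += w
--             L[c] -= 1
--
--     return ans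
-- ===== SOURCE B (Python) =====
-- def maximize_ball_value(N, M, C, limits, balls):
--     L = {i + 1: limits[i] for i in range(C)}
--     if M <= 0:
--         return 0
--     by_color = {}
--     for c, w in balls:
--         by_color.setdefault(c, []).append(w)
--     pool = []
--     for c, vals in by_color.items():
--         lim = L[c]
--         if lim > 0:
--             vals.sort(reverse=True)
--             pool.extend(vals[:lim])
--     pool.sort(reverse=True)
--     return sum(pool[:M])
-- ===== Notes on version B (the rewrite author's own statement) =====
-- stated objective: alternative
-- what changed: Replaces A's capped greedy walk over one globally sorted list (mutating a per-color budget dict) by an early 0 for M <= 0, then grouping balls per color, truncating each color's descending value list to its limit, and summing the top M of the combined candidate pool.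
-- outside the precondition, e.g. on maximize_ball_value(0, -1, 1, [1], [(1, 5)]): A returns 5, B returns 0; on maximize_ball_value(0, 1, 1, [-1], [(1, 5)]): A returns 5, B returns 0; on maximize_ball_value(0, 1, 1, [1], [(1, 5), (5, -9)]): A returns 5, B raises KeyError
import Mathlib
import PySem

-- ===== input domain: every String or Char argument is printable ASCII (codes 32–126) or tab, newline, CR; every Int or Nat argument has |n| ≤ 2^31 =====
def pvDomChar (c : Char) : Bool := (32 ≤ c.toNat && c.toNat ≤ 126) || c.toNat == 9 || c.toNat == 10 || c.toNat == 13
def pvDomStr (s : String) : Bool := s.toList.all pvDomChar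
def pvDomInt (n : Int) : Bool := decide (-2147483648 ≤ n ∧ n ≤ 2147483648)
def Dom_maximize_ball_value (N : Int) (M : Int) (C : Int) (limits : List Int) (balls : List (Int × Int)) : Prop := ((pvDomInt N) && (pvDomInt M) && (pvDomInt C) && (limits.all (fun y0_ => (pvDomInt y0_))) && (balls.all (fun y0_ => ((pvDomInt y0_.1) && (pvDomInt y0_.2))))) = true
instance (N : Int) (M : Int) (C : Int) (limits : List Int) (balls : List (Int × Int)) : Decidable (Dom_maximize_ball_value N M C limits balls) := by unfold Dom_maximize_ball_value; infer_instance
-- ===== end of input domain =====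

-- B replaces A's capped greedy walk over one globally sorted list by an early 0 for M <= 0, then
-- per-color grouping, truncation to each color's limit, and a single global top-M pick
-- (alternative algorithm, same cost).

-- ===== PORT A =====
-- L = {i + 1: limits[i] for i in range(C)}  — shared verbatim by both Pythons.
-- pyGetD with default 0 is exact under Pre_ (0 ≤ i < C ≤ len(limits)).
def pvMkL (C : Int) (limits : List Int) : PySem.Dict Int Int :=
  (PySem.List.pyRange 0 C 1).foldl
    (fun d i => d.insert (i + 1) (PySem.List.pyGetD limits i 0)) PySem.Dict.empty

-- A's for-loop with its break/continue; L[c] reads/writes are getD/insert, exact under Pre_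
-- (every ball color is a key of L).
def pvGreedy (M : Int) : List (Int × Int) → Int → Int → PySem.Dict Int Int → Int
  | [], _, ans, _ => ans
  | (c, w) :: rest, count, ans, L =>
    if count == M then ans
    else if L.getD c 0 == 0 then pvGreedy M rest count ans L
    else pvGreedy M rest (count + 1) (ans + w) (L.insert c (L.getD c 0 - 1))

def maximize_ball_value (N : Int) (M : Int) (C : Int) (limits : List Int) (balls : List (Int × Int)) : Int :=
  pvGreedy M (PySem.List.sorted balls (fun x => x.2) true) 0 0 (pvMkL C limits)

-- ===== PORT B =====
-- by_color: 'for c, w in balls: by_color.setdefault(c, []).append(w)'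
def pvByColor (balls : List (Int × Int)) : PySem.Dict Int (List Int) :=
  balls.foldl (fun d p => d.modify p.1 [] (· ++ [p.2])) PySem.Dict.empty

-- pool: 'for c, vals in by_color.items(): lim = L[c]; if lim > 0: pool.extend(sorted(vals, reverse=True)[:lim])'
-- L[c] is getD, exact under Pre_: when this loop runs (M > 0), every ball color is a key of L
def pvPool (L : PySem.Dict Int Int) (byColor : PySem.Dict Int (List Int)) : List Int :=
  byColor.items.foldl (fun pool p =>
    if 0 < L.getD p.1 0 then
      pool ++ PySem.List.slice (PySem.List.sorted p.2 (fun x => x) true) none (some (L.getD p.1 0))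
    else pool) []

-- 'if M <= 0: return 0' then 'pool.sort(reverse=True); return sum(pool[:M])'
def maximize_ball_value_alt (N : Int) (M : Int) (C : Int) (limits : List Int) (balls : List (Int × Int)) : Int :=
  if M ≤ 0 then 0
  else
    (PySem.List.slice (PySem.List.sorted (pvPool (pvMkL C limits) (pvByColor balls)) (fun x => x) true)
      none (some M)).sum

-- ===== PRECONDITION & SPEC =====
-- Pre_ restricts to the task's natural domain: C ≤ len(limits) (else A's dict build raises
-- IndexError), and — unless no balls or M = 0, where both trivially return — a positive M,
-- every ball color in 1..C (A's walk may raise KeyError on others, depending on the sort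
-- order) and a nonnegative limit for each occurring color (negative counts/limits are outside
-- the task's meaning, though A's greedy still returns a value there).
def Pre_maximize_ball_value (N : Int) (M : Int) (C : Int) (limits : List Int) (balls : List (Int × Int)) : Prop :=
  C ≤ PySem.List.len limits ∧
    (balls = [] ∨ M = 0 ∨
      (0 < M ∧ ∀ p ∈ balls, 1 ≤ p.1 ∧ p.1 ≤ C ∧ 0 ≤ limits.getD (p.1 - 1).toNat 0))
instance (N : Int) (M : Int) (C : Int) (limits : List Int) (balls : List (Int × Int)) : Decidable (Pre_maximize_ball_value N M C limits balls) := by unfold Pre_maximize_ball_value; infer_instance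

def pvWitness_maximize_ball_value : Int × Int × Int × List Int × (List (Int × Int)) :=
  (0, 2, 2, [1, 2], [(1, 5), (2, 3), (1, 4)])

def Spec_maximize_ball_value (N : Int) (M : Int) (C : Int) (limits : List Int) (balls : List (Int × Int)) (out : Int) : Prop := out = maximize_ball_value_alt N M C limits balls
instance (N : Int) (M : Int) (C : Int) (limits : List Int) (balls : List (Int × Int)) (out : Int) : Decidable (Spec_maximize_ball_value N M C limits balls out) := by unfold Spec_maximize_ball_value; infer_instance

-- ===== CLAIM (what is proved, stated in full; the proofs are below) =====
def Claim_equal_maximize_ball_value : Prop := ∀ (N : Int) (M : Int) (C : Int) (limits : List Int) (balls : List (Int × Int)), Dom_maximize_ball_value N M C limits balls → Pre_maximize_ball_value N M C limits balls → Spec_maximize_ball_value N M C limits balls (maximize_ball_value N M C limits balls)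

-- ===== LEMMAS AND PROOFS =====

-- The per-color-budget selection A's loop performs, with the cap M removed: keep a ball unless
-- its color's remaining budget is 0, decrementing the budget of every kept ball.
def pvTrunc : List (Int × Int) → PySem.Dict Int Int → List (Int × Int)
  | [], _ => []
  | (c, w) :: rest, L =>
    if L.getD c 0 == 0 then pvTrunc rest L
    else (c, w) :: pvTrunc rest (L.insert c (L.getD c 0 - 1))

-- A's capped greedy walk sums the first (M - count) values the uncapped selection keeps
theorem pvGreedy_eq_trunc (M : Int) (bs : List (Int × Int)) :
    ∀ (L : PySem.Dict Int Int) (count ans : Int), count ≤ M →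
    pvGreedy M bs count ans L =
      ans + (((pvTrunc bs L).map (fun x => x.2)).take (M - count).toNat).sum := by
  induction bs with
  | nil => intro L count ans _; simp [pvGreedy, pvTrunc]
  | cons p rest ih =>
    obtain ⟨c, w⟩ := p
    intro L count ans h
    by_cases hm : count = M
    · subst hm
      simp [pvGreedy]
    · have hnat : (M - count).toNat = (M - (count + 1)).toNat + 1 := by omega
      simp only [pvGreedy, pvTrunc]
      rw [if_neg (by simpa using hm)]
      by_cases hz : L.getD c 0 = 0
      · rw [if_pos (by simpa using hz), if_pos (by simpa using hz), ih L count ans h]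
      · rw [if_neg (by simpa using hz), if_neg (by simpa using hz),
            ih _ (count + 1) (ans + w) (by omega)]
        rw [hnat]
        simp [List.take_succ_cons]
        ring

theorem pvTrunc_sublist (bs : List (Int × Int)) :
    ∀ L, (pvTrunc bs L).Sublist bs := by
  induction bs with
  | nil => intro L; simp [pvTrunc]
  | cons p rest ih =>
    obtain ⟨c, w⟩ := p
    intro L
    simp only [pvTrunc]
    split
    · exact (ih L).cons _
    · exact (ih _).cons₂ _

-- the balls of color c that the budgeted selection keeps are the first (budget of c) of them
theorem pvTrunc_filter (bs : List (Int × Int)) :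
    ∀ (L : PySem.Dict Int Int) (c : Int), 0 ≤ L.getD c 0 →
    (pvTrunc bs L).filter (fun p => p.1 == c) =
      ((bs.filter (fun p => p.1 == c)).take (L.getD c 0).toNat) := by
  induction bs with
  | nil => intro L c _; simp [pvTrunc]
  | cons p rest ih =>
    obtain ⟨a, w⟩ := p
    intro L c h
    simp only [pvTrunc]
    by_cases hac : a = c
    · subst hac
      by_cases hz : L.getD a 0 = 0
      · rw [if_pos (by simpa using hz), ih L a h]
        simp [hz]
      · rw [if_neg (by simpa using hz)]
        have hins : (L.insert a (L.getD a 0 - 1)).getD a 0 = L.getD a 0 - 1 :=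
          PySem.Dict.getD_insert_self ..
        have h' : 0 ≤ (L.insert a (L.getD a 0 - 1)).getD a 0 := by rw [hins]; omega
        rw [List.filter_cons_of_pos (by simp), List.filter_cons_of_pos (by simp), ih _ a h', hins]
        have hnat : (L.getD a 0).toNat = (L.getD a 0 - 1).toNat + 1 := by omega
        rw [hnat, List.take_succ_cons]
    · have hgd : ∀ v, (L.insert a v).getD c 0 = L.getD c 0 := by
        intro v
        rw [PySem.Dict.getD_insert, if_neg (fun hh => hac hh.symm)]
      by_cases hz : L.getD a 0 = 0
      · rw [if_pos (by simpa using hz), ih L c h,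
            List.filter_cons_of_neg (by simpa using hac)]
      · rw [if_neg (by simpa using hz),
            List.filter_cons_of_neg (by simpa using hac),
            ih _ c (by rw [hgd]; exact h), hgd,
            List.filter_cons_of_neg (by simpa using hac)]

-- a list of colored balls is a permutation of its per-color filters, color by color
theorem pvPerm_flatMap_filter (cs : List Int) :
    ∀ (l : List (Int × Int)), cs.Nodup → (∀ p ∈ l, p.1 ∈ cs) →
    l.Perm (cs.flatMap (fun c => l.filter (fun p => p.1 == c))) := by
  induction cs with
  | nil =>
    intro l _ h
    cases l with
    | nil => simp
    | cons p t => simpa using h p (by simp)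
  | cons c cs ih =>
    intro l hnd h
    have hstep : (l.filter (fun p => p.1 == c) ++ l.filter (fun p => !(p.1 == c))).Perm l :=
      List.filter_append_perm _ l
    have hsub : ∀ p ∈ l.filter (fun p => !(p.1 == c)), p.1 ∈ cs := by
      intro p hp
      rw [List.mem_filter] at hp
      rcases List.mem_cons.mp (h p hp.1) with h2 | h2
      · exact absurd h2 (by simpa using hp.2)
      · exact h2
    have ihp := ih (l.filter (fun p => !(p.1 == c))) (List.nodup_cons.mp hnd).2 hsub
    have hkey : ∀ c' ∈ cs,
        (l.filter (fun p => !(p.1 == c))).filter (fun p => p.1 == c') =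
          l.filter (fun p => p.1 == c') := by
      intro c' hc'
      have hne : c' ≠ c := by
        rintro rfl
        exact (List.nodup_cons.mp hnd).1 hc'
      rw [List.filter_filter]
      apply List.filter_congr
      intro p _
      by_cases hpc : p.1 = c'
      · simp [hpc, hne]
      · simp [hpc]
    have hfm : cs.flatMap (fun c' => (l.filter (fun p => !(p.1 == c))).filter (fun p => p.1 == c'))
        = cs.flatMap (fun c' => l.filter (fun p => p.1 == c')) := List.flatMap_congr hkey
    rw [List.flatMap_cons]
    refine hstep.symm.trans (List.Perm.append_left _ ?_)
    rw [← hfm]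
    exact ihp

theorem pvMkL_get?_aux (limits : List Int) (is : List Int) :
    ∀ (d : PySem.Dict Int Int) (c : Int),
    (is.foldl (fun d i => d.insert (i + 1) (PySem.List.pyGetD limits i 0)) d).get? c =
      if (c - 1) ∈ is then some (PySem.List.pyGetD limits (c - 1) 0) else d.get? c := by
  induction is using List.reverseRecOn with
  | nil => intro d c; simp
  | append_singleton t j ih =>
    intro d c
    rw [List.foldl_append, List.foldl_cons, List.foldl_nil, PySem.Dict.get?_insert, ih]
    by_cases hcj : c = j + 1
    · have hj : c - 1 = j := by omega
      simp [hcj]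
    · have hj : c - 1 ≠ j := by omega
      simp [hcj, hj]

theorem pvMkL_get? (C : Int) (limits : List Int) (c : Int) (h1 : 1 ≤ c) (h2 : c ≤ C) :
    (pvMkL C limits).get? c = some (PySem.List.pyGetD limits (c - 1) 0) := by
  unfold pvMkL
  rw [pvMkL_get?_aux, if_pos (by rw [PySem.List.mem_pyRange_one]; omega)]

theorem pvMkL_getD (C : Int) (limits : List Int) (c : Int) (h1 : 1 ≤ c) (h2 : c ≤ C) :
    (pvMkL C limits).getD c 0 = PySem.List.pyGetD limits (c - 1) 0 := by
  rw [PySem.Dict.getD_eq_get?_getD, pvMkL_get? C limits c h1 h2, Option.getD_some]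

-- A with M = 0 breaks out of its loop at once
theorem pvGreedy_zero (bs : List (Int × Int)) (L : PySem.Dict Int Int) :
    pvGreedy 0 bs 0 0 L = 0 := by
  cases bs with
  | nil => rfl
  | cons p rest => obtain ⟨c, w⟩ := p; simp [pvGreedy]

-- two permuted lists that are both weakly decreasing are equal
theorem pvDesc_eq {l₁ l₂ : List Int} (hp : l₁.Perm l₂)
    (h₁ : l₁.Pairwise (fun a b => b ≤ a)) (h₂ : l₂.Pairwise (fun a b => b ≤ a)) : l₁ = l₂ :=
  hp.eq_of_pairwise (fun _ _ _ _ ha hb => le_antisymm hb ha) h₁ h₂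

-- ===== VERDICT (by name: the statement is the Claim_ definition above) =====
theorem maximize_ball_value_spec : Claim_equal_maximize_ball_value := by
  intro N M C limits balls _ hpre
  obtain ⟨hC, hcase⟩ := hpre
  unfold Spec_maximize_ball_value maximize_ball_value maximize_ball_value_alt
  rcases hcase with rfl | rfl | ⟨hMpos, hcol⟩
  case inl =>
    -- no balls: A's loop is a no-op and B's pool is empty; both return 0 (for any M)
    simp [pvGreedy, pvPool, pvByColor, PySem.List.sorted, PySem.Dict.empty, PySem.List.slice]
  case inr.inl =>
    -- M = 0: A breaks at once and B returns 0 up front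
    rw [pvGreedy_zero, if_pos le_rfl]
  rw [if_neg (not_le.mpr hMpos)]
  have hM : 0 ≤ M := le_of_lt hMpos
  set L := pvMkL C limits with hLdef
  set S := PySem.List.sorted balls (fun x => x.2) true with hSdef
  set cs := PySem.Set.ofList (balls.map (fun p => p.1)) with hcsdef
  have hClen : C ≤ (limits.length : Int) := by simpa [PySem.List.len_eq] using hC
  -- every color that occurs in balls has a nonnegative budget in L
  have hbud : ∀ c ∈ cs, 0 ≤ L.getD c 0 := by
    intro c hc
    rw [hcsdef] at hc
    obtain ⟨p, hp, rfl⟩ := List.mem_map.mp ((PySem.Set.mem_ofList _ _).mp hc)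
    obtain ⟨h1, h2, h3⟩ := hcol p hp
    rw [hLdef, pvMkL_getD C limits p.1 h1 h2,
        PySem.List.pyGetD_eq_getElem limits 0 (by omega) (by omega)]
    rwa [List.getD_eq_getElem limits 0 (by omega)] at h3
  -- key facts about B's by_color dict
  have hkeys : (pvByColor balls).keys = cs := by
    unfold pvByColor
    rw [PySem.Dict.keys_foldl_modify_key balls (fun p => p.1) [] (fun _ p => (· ++ [p.2])),
        PySem.Dict.keys_empty, PySem.Set.update_nil_left, hcsdef]
  have hnodup : (pvByColor balls).keys.Nodup := by
    rw [hkeys, hcsdef]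
    exact PySem.Set.nodup_ofList _
  have hvals : ∀ c, (pvByColor balls).getD c [] =
      (balls.filter (fun p => p.1 == c)).map (fun x => x.2) := by
    intro c
    unfold pvByColor
    rw [PySem.Dict.getD_foldl_modify_append]
    simp
  have hitems : (pvByColor balls).items =
      cs.map (fun k => (k, (pvByColor balls).getD k [])) := by
    rw [← hkeys]
    exact PySem.Dict.items_eq_map_keys _ hnodup []
  -- every ball kept by the budgeted selection has its color in cs
  have hmem : ∀ p ∈ pvTrunc S L, p.1 ∈ cs := by
    intro p hp
    have hpS : p ∈ S := List.Sublist.mem hp (pvTrunc_sublist S L)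
    have hpb : p ∈ balls := (PySem.List.mem_sorted balls _ true p).mp hpS
    rw [hcsdef]
    exact (PySem.Set.mem_ofList _ _).mpr (List.mem_map.mpr ⟨p, hpb, rfl⟩)
  -- for each color, B's truncated descending list is the per-color part of pvTrunc
  have hsorted_eq : ∀ c ∈ cs,
      PySem.List.sorted ((balls.filter (fun p => p.1 == c)).map (fun x => x.2)) (fun x => x) true
        = (S.filter (fun p => p.1 == c)).map (fun x => x.2) := by
    intro c _
    apply pvDesc_eq
    · refine (PySem.List.sorted_perm _ _ _).trans ?_
      exact (((PySem.List.sorted_perm balls (fun x => x.2) true).filter _).map _).symm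
    · exact PySem.List.sorted_pairwise_rev _ _
    · exact List.pairwise_map.mpr
        ((PySem.List.sorted_pairwise_rev balls (fun x => x.2)).sublist List.filter_sublist)
  have hper : ∀ c ∈ cs,
      (if 0 < L.getD c 0 then
        PySem.List.slice
          (PySem.List.sorted ((balls.filter (fun p => p.1 == c)).map (fun x => x.2)) (fun x => x) true)
          none (some (L.getD c 0))
      else []) = ((pvTrunc S L).filter (fun p => p.1 == c)).map (fun x => x.2) := by
    intro c hc
    have hb := hbud c hc
    rw [pvTrunc_filter S L c hb]
    by_cases hpos : 0 < L.getD c 0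
    · rw [if_pos hpos, PySem.List.slice_to _ (le_of_lt hpos), hsorted_eq c hc, List.map_take]
    · have h0 : L.getD c 0 = 0 := le_antisymm (not_lt.mp hpos) hb
      rw [if_neg hpos, h0]
      simp
  -- B's pool is, color by color, the per-color parts of pvTrunc
  have hpool : pvPool L (pvByColor balls) =
      cs.flatMap (fun c => ((pvTrunc S L).filter (fun p => p.1 == c)).map (fun x => x.2)) := by
    unfold pvPool
    rw [PySem.List.foldl_congr_mem ((pvByColor balls).items) _
        (fun pool p => pool ++
          (if 0 < L.getD p.1 0 then
            PySem.List.slice (PySem.List.sorted p.2 (fun x => x) true) none (some (L.getD p.1 0))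
          else [])) []
        (by intro acc x _; by_cases hx : 0 < L.getD x.1 0 <;> simp [hx]),
      PySem.List.foldl_append_eq_flatMap, List.nil_append, hitems, List.flatMap_map]
    simp only [hvals]
    exact List.flatMap_congr hper
  have hperm : (pvPool L (pvByColor balls)).Perm ((pvTrunc S L).map (fun x => x.2)) := by
    rw [hpool, ← List.map_flatMap]
    exact ((pvPerm_flatMap_filter cs (pvTrunc S L) (hcsdef ▸ PySem.Set.nodup_ofList _) hmem).symm).map _
  -- B's finally sorted pool IS the value list of pvTrunc (both are descending)
  have hfinal : PySem.List.sorted (pvPool L (pvByColor balls)) (fun x => x) true =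
      (pvTrunc S L).map (fun x => x.2) := by
    apply pvDesc_eq
    · exact (PySem.List.sorted_perm _ _ _).trans hperm
    · exact PySem.List.sorted_pairwise_rev _ _
    · exact List.pairwise_map.mpr
        ((PySem.List.sorted_pairwise_rev balls (fun x => x.2)).sublist (pvTrunc_sublist S L))
  rw [pvGreedy_eq_trunc M S L 0 0 hM, hfinal, PySem.List.slice_to _ hM]
  simp
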